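-- pv_equiv track=rewrite | github.com/hj-joo/Python-Algorithm-Team-Notes | Binary_search/make_dduck.py | make_dduck
-- ===== SOURCE A (Python) =====
-- def make_dduck(target, arr, start, end):
--     if start > end:
--         return
--
--     mid = (start + end) // 2
--     sum = 0
--     for i in arr:
--         if i < mid:
--             continue
--         sum += i - mid
--
--     if target == sum:
--         return mid
--
--     elif sum > target:
--         return make_dduck(target, arr, mid+1, end)
--     else:
--         return make_dduck(target, arr, start, mid-1)
-- ===== SOURCE B (Python) =====
-- def make_dduck(target, arr, start, end):
--     # sort once + prefix sums; each candidate height's leftover is read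
--     # off via an inner binary search instead of rescanning arr
--     s = sorted(arr)
--     n = len(s)
--     prefix = [0]
--     acc = 0
--     for x in s:
--         acc += x
--         prefix.append(acc)
--
--     def leftover(mid):
--         # first index lo with s[lo] >= mid
--         lo, hi = 0, n
--         while lo < hi:
--             m = (lo + hi) // 2
--             if s[m] < mid:
--                 lo = m + 1
--             else:
--                 hi = m
--         return (prefix[n] - prefix[lo]) - (n - lo) * mid
--
--     while start <= end:
--         mid = (start + end) // 2
--         total = leftover(mid)
--         if target == total:
--             return mid
--         elif total > target:
--             start = mid + 1
--         else:
--             end = mid - 1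
--     return None
-- ===== Notes on version B (the rewrite author's own statement) =====
-- stated objective: alternative
-- what changed: Replaces the O(n) rescan of arr at every binary-search step by a one-time sort + prefix-sum table, finding each cut point with an inner binary search, and replaces the recursion on (start,end) by an iterative loop.
import Mathlib
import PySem

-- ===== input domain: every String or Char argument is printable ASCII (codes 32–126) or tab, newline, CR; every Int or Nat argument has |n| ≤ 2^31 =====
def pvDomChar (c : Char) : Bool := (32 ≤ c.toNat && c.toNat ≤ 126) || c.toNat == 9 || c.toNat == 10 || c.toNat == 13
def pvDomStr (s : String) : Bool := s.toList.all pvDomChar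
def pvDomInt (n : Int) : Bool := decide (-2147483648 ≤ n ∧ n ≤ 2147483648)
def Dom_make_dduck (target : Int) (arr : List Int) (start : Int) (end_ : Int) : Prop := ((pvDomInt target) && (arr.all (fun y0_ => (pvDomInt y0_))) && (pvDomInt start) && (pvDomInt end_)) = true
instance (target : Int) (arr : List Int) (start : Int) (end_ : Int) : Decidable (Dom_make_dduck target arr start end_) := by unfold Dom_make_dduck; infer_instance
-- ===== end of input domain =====

-- B replaces A's per-step rescan of arr by a one-time sort + prefix-sum table queried with an
-- inner binary search, and is iterative instead of recursive (alternative algorithm).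

-- ===== PORT A =====
def make_dduck (target : Int) (arr : List Int) (start : Int) (end_ : Int) : Option Int :=
  if _h : start > end_ then none
  else
    let mid := PySem.Int.floordiv (start + end_) 2
    let sum := arr.foldl (fun s i => if i < mid then s else s + (i - mid)) 0
    if target == sum then some mid
    else if sum > target then make_dduck target arr (mid + 1) end_
    else make_dduck target arr start (mid - 1)
termination_by (end_ - start + 1).toNat
decreasing_by
  · have := PySem.Int.floordiv_two_mid_bounds (le_of_not_gt _h)
    omega
  · have := PySem.Int.floordiv_two_mid_bounds (le_of_not_gt _h)
    omega

-- ===== PORT B =====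
-- inner binary search of Source B's leftover: first index lo in [lo,hi) with s[lo] ≥ mid
-- (s[m] is always in range here since lo < hi ≤ len s, so pyGetD is exact)
def lowerB (s : List Int) (mid : Int) (lo hi : Nat) : Nat :=
  if _h : lo < hi then
    let m := (lo + hi) / 2
    if PySem.List.pyGetD s (m : Int) 0 < mid then lowerB s mid (m + 1) hi
    else lowerB s mid lo m
  else lo
termination_by hi - lo
decreasing_by all_goals omega

def leftoverB (s pre : List Int) (n : Nat) (mid : Int) : Int :=
  let lo := lowerB s mid 0 n
  (PySem.List.pyGetD pre (n : Int) 0 - PySem.List.pyGetD pre (lo : Int) 0) - ((n : Int) - (lo : Int)) * mid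

-- Source B's prefix loop: prefix = [0]; for x in s: acc += x; prefix.append(acc)
def buildPre (s : List Int) : List Int :=
  (s.foldl (fun (st : List Int × Int) x => (st.1 ++ [st.2 + x], st.2 + x)) ([0], 0)).1

def altLoop (target : Int) (s pre : List Int) (n : Nat) (start end_ : Int) : Option Int :=
  if _h : start ≤ end_ then
    let mid := PySem.Int.floordiv (start + end_) 2
    let total := leftoverB s pre n mid
    if target == total then some mid
    else if total > target then altLoop target s pre n (mid + 1) end_
    else altLoop target s pre n start (mid - 1)
  else none
termination_by (end_ - start + 1).toNat
decreasing_by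
  · have := PySem.Int.floordiv_two_mid_bounds _h
    omega
  · have := PySem.Int.floordiv_two_mid_bounds _h
    omega

def make_dduck_alt (target : Int) (arr : List Int) (start : Int) (end_ : Int) : Option Int :=
  let s := PySem.List.sorted arr (fun x => x) false
  let n := s.length
  let pre := buildPre s
  altLoop target s pre n start end_

-- ===== PRECONDITION & SPEC =====
def Spec_make_dduck (target : Int) (arr : List Int) (start : Int) (end_ : Int) (out : Option Int) : Prop := out = make_dduck_alt target arr start end_
instance (target : Int) (arr : List Int) (start : Int) (end_ : Int) (out : Option Int) : Decidable (Spec_make_dduck target arr start end_ out) := by unfold Spec_make_dduck; infer_instance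

-- ===== CLAIM (what is proved, stated in full; the proofs are below) =====
def Claim_equal_make_dduck : Prop := ∀ (target : Int) (arr : List Int) (start : Int) (end_ : Int), Dom_make_dduck target arr start end_ → Spec_make_dduck target arr start end_ (make_dduck target arr start end_)

-- ===== LEMMAS AND PROOFS =====

-- partial sums helper for reasoning about buildPre
def psums (acc : Int) : List Int → List Int
  | [] => []
  | x :: t => (acc + x) :: psums (acc + x) t

theorem foldl_pre (s : List Int) (pre : List Int) (acc : Int) :
    (s.foldl (fun (st : List Int × Int) x => (st.1 ++ [st.2 + x], st.2 + x)) (pre, acc)).1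
      = pre ++ psums acc s := by
  induction s generalizing pre acc with
  | nil => simp [psums]
  | cons x t ih => simp [List.foldl, psums, ih]

theorem psums_getD (s : List Int) : ∀ (acc : Int) (k : Nat), k < s.length →
    (psums acc s).getD k 0 = acc + (s.take (k + 1)).sum := by
  induction s with
  | nil => intro acc k h; simp at h
  | cons x t ih =>
    intro acc k h
    cases k with
    | zero => simp [psums]
    | succ k =>
      simp only [psums, List.getD_cons_succ, List.take_succ_cons, List.sum_cons]
      rw [ih (acc + x) k (by simpa using h)]
      ring

theorem buildPre_getD (s : List Int) (k : Nat) (hk : k ≤ s.length) :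
    (buildPre s).getD k 0 = (s.take k).sum := by
  unfold buildPre
  rw [foldl_pre]
  cases k with
  | zero => simp
  | succ k =>
    have hlt : k < s.length := by omega
    simp only [List.singleton_append, List.getD_cons_succ]
    rw [psums_getD s 0 k hlt]
    simp

def fCut (mid x : Int) : Int := if x < mid then 0 else x - mid

theorem foldl_sumA (mid : Int) (l : List Int) : ∀ (init : Int),
    l.foldl (fun s i => if i < mid then s else s + (i - mid)) init
      = init + (l.map (fCut mid)).sum := by
  induction l with
  | nil => simp
  | cons x t ih =>
    intro init
    simp only [List.foldl_cons, List.map_cons, List.sum_cons, fCut]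
    by_cases h : x < mid
    · simp [h, ih]
    · simp [h, ih]; ring

theorem lowerB_spec (s : List Int) (hs : s.Pairwise (· ≤ ·)) (mid : Int) :
    ∀ (lo hi : Nat), lo ≤ hi → hi ≤ s.length →
    (∀ i, i < lo → s.getD i 0 < mid) →
    (∀ i, hi ≤ i → i < s.length → ¬ s.getD i 0 < mid) →
    (lowerB s mid lo hi ≤ s.length ∧
     (∀ i, i < lowerB s mid lo hi → s.getD i 0 < mid) ∧
     (∀ i, lowerB s mid lo hi ≤ i → i < s.length → ¬ s.getD i 0 < mid)) := by
  have hmono : ∀ i j, i ≤ j → j < s.length → s.getD i 0 ≤ s.getD j 0 := by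
    intro i j hij hj
    rcases eq_or_lt_of_le hij with rfl | hlt
    · exact le_refl _
    · have := List.pairwise_iff_getElem.mp hs i j (by omega) hj hlt
      rw [List.getD_eq_getElem s 0 (by omega), List.getD_eq_getElem s 0 hj]
      exact this
  intro lo hi
  induction hlohi : hi - lo using Nat.strong_induction_on generalizing lo hi with
  | _ d ih =>
  intro hle hhi hlow hhigh
  rw [lowerB]
  by_cases h : lo < hi
  · simp only [h, dif_pos]
    have hm : (lo + hi) / 2 < s.length := by omega
    have hmget : PySem.List.pyGetD s (((lo + hi) / 2 : Nat) : Int) 0 = s.getD ((lo + hi) / 2) 0 := by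
      rw [PySem.List.pyGetD_natCast]
    by_cases hc : PySem.List.pyGetD s (((lo + hi) / 2 : Nat) : Int) 0 < mid
    · simp only [hc, if_pos]
      refine ih (hi - ((lo + hi) / 2 + 1)) (by omega) _ _ (by omega) (by omega) hhi ?_ hhigh
      intro i hi2
      have : s.getD i 0 ≤ s.getD ((lo + hi) / 2) 0 := hmono i _ (by omega) hm
      rw [hmget] at hc
      omega
    · simp only [hc, if_neg, not_false_iff]
      refine ih ((lo + hi) / 2 - lo) (by omega) _ _ (by omega) (by omega) (by omega) hlow ?_
      intro i hi2 hi3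
      have : s.getD ((lo + hi) / 2) 0 ≤ s.getD i 0 := hmono _ i hi2 hi3
      rw [hmget] at hc
      omega
  · simp only [h, dif_neg, not_false_iff]
    exact ⟨by omega, hlow, by intro i h1 h2; exact hhigh i (by omega) h2⟩

theorem sum_map_sub (mid : Int) (t : List Int) :
    (t.map (fun x => x - mid)).sum = t.sum - (t.length : Int) * mid := by
  induction t with
  | nil => simp
  | cons x r ih => simp [ih]; ring

-- the crux: B's leftover computation equals A's per-mid scan sum
theorem leftover_eq (arr : List Int) (mid : Int) :
    leftoverB (PySem.List.sorted arr (fun x => x) false)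
        (buildPre (PySem.List.sorted arr (fun x => x) false))
        (PySem.List.sorted arr (fun x => x) false).length mid
      = arr.foldl (fun s i => if i < mid then s else s + (i - mid)) 0 := by
  set s := PySem.List.sorted arr (fun x => x) false with hsdef
  have hperm : s.Perm arr := PySem.List.sorted_perm arr (fun x => x) false
  have hs : s.Pairwise (· ≤ ·) := by
    have := PySem.List.sorted_pairwise arr (fun x => x)
    simpa using this
  rw [foldl_sumA, ← (hperm.map (fCut mid)).sum_eq]
  simp only [leftoverB]
  set lo := lowerB s mid 0 s.length with hlodef
  obtain ⟨hlen, hlow, hhigh⟩ :=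
    lowerB_spec s hs mid 0 s.length (by omega) (le_refl _)
      (by intro i h; omega) (by intro i h1 h2; omega)
  rw [← hlodef] at hlen hlow hhigh
  have hpren : PySem.List.pyGetD (buildPre s) ((s.length : Nat) : Int) 0 = s.sum := by
    rw [PySem.List.pyGetD_natCast, buildPre_getD s s.length (le_refl _), List.take_length]
  have hprelo : PySem.List.pyGetD (buildPre s) ((lo : Nat) : Int) 0 = (s.take lo).sum := by
    rw [PySem.List.pyGetD_natCast, buildPre_getD s lo hlen]
  rw [hpren, hprelo]
  -- split s into take lo ++ drop lo
  have hsplit : s = s.take lo ++ s.drop lo := (List.take_append_drop lo s).symm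
  have htake0 : ((s.take lo).map (fCut mid)).sum = 0 := by
    apply List.sum_eq_zero
    intro y hy
    rw [List.mem_map] at hy
    obtain ⟨x, hx, rfl⟩ := hy
    rw [List.mem_iff_getElem] at hx
    obtain ⟨i, hi, hxe⟩ := hx
    have hilen : i < lo := by
      have := s.length_take_le lo
      have := hi
      simp at this
      omega
    have hix : (s.take lo)[i] = s.getD i 0 := by
      rw [List.getElem_take, List.getD_eq_getElem s 0 (by
        have h2 : i < s.length := by
          have := List.length_take_le lo s
          omega
        exact h2)]
    have hxlt : x < mid := by rw [← hxe, hix]; exact hlow i hilen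
    simp [fCut, hxlt]
  have hdrop : ((s.drop lo).map (fCut mid)).sum
      = (s.drop lo).sum - ((s.drop lo).length : Int) * mid := by
    rw [show (s.drop lo).map (fCut mid) = (s.drop lo).map (fun x => x - mid) from ?_, sum_map_sub]
    apply List.map_congr_left
    intro x hx
    rw [List.mem_iff_getElem] at hx
    obtain ⟨i, hi, hxe⟩ := hx
    have hgl : (s.drop lo)[i] = s.getD (lo + i) 0 := by
      rw [List.getElem_drop, List.getD_eq_getElem s 0 (by
        have hld : (s.drop lo).length = s.length - lo := List.length_drop; omega)]
    have : ¬ x < mid := by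
      rw [← hxe, hgl]
      exact hhigh (lo + i) (by have hld : (s.drop lo).length = s.length - lo := List.length_drop; omega) (by have hld2 : (s.drop lo).length = s.length - lo := List.length_drop; omega)
    simp [fCut, this]
  have hsum : (s.map (fCut mid)).sum
      = ((s.take lo).map (fCut mid)).sum + ((s.drop lo).map (fCut mid)).sum := by
    conv_lhs => rw [hsplit]
    simp
  have hdsum : (s.drop lo).sum = s.sum - (s.take lo).sum := by
    have : (s.take lo).sum + (s.drop lo).sum = s.sum := by
      conv_rhs => rw [hsplit]; simp
      simp
    omega
  have hdlen : ((s.drop lo).length : Int) = (s.length : Int) - (lo : Int) := by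
    have hld : (s.drop lo).length = s.length - lo := List.length_drop
    have := hlen
    omega
  rw [hsum, htake0, hdrop, hdsum, hdlen]
  ring

theorem loop_eq (target : Int) (arr : List Int) : ∀ (start end_ : Int),
    make_dduck target arr start end_
      = altLoop target (PySem.List.sorted arr (fun x => x) false)
          (buildPre (PySem.List.sorted arr (fun x => x) false))
          (PySem.List.sorted arr (fun x => x) false).length start end_ := by
  intro start end_
  induction hm : (end_ - start + 1).toNat using Nat.strong_induction_on generalizing start end_ with
  | _ d ih =>
  rw [make_dduck, altLoop]
  by_cases h : start > end_
  · simp [h, not_le_of_gt h]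
  · have hle : start ≤ end_ := le_of_not_gt h
    simp only [h, dif_neg, not_false_iff, hle, dif_pos]
    have hsum := leftover_eq arr (PySem.Int.floordiv (start + end_) 2)
    rw [hsum]
    have hmid := PySem.Int.floordiv_two_mid_bounds hle
    split
    · rfl
    · split
      · exact ih _ (by omega) _ _ rfl
      · exact ih _ (by omega) _ _ rfl

-- ===== VERDICT (by name: the statement is the Claim_ definition above) =====
theorem make_dduck_spec : Claim_equal_make_dduck := by
  intro target arr start end_ _
  unfold Spec_make_dduck make_dduck_alt
  exact loop_eq target arr start end_
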